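-- pv_equiv track=rewrite | github.com/steadycompass/mysteadycompass | app.py | _filter_news_macro_scored
-- ===== SOURCE A (Python) =====
-- MACRO_KEYWORDS_WEIGHTED = [
--     ("fed", 5), ("federal reserve", 5), ("rate hike", 5), ("rate cut", 5),
--     ("monetary policy", 5), ("central bank", 5),
--     ("inflation", 4), ("cpi", 4), ("pce", 4),
--     ("recession", 4), ("gdp", 4), ("unemployment", 4),
--     ("treasury", 3), ("bond yield", 3), ("10-year yield", 3),
--     ("banking crisis", 3), ("debt ceiling", 3), ("credit rating", 3), ("default", 3),
--     ("stock market", 2), ("s&p 500", 2), ("nasdaq", 2), ("dow", 2),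
--     ("earnings", 1), ("profit warning", 1),
--     ("oil price", 1), ("crude oil", 1), ("geopolitical", 1), ("china economy", 1),
--     ("trade war", 1), ("tariffs", 1), ("housing market", 1), ("consumer spending", 1),
-- ]
--
-- EXCLUDE_KEYWORDS = [
--     "iphone", "tesla delivery", "product launch", "quarterly sales", "stock split",
--     "ceo interview", "merger talks",
-- ]
--
-- def _score_news_item(title, description=""):
--     """Score by macro importance. Fed +5, Inflation +4, Recession +4, etc. Exclude keywords subtract 3."""
--     text = ((title or "") + " " + (description or "")).lower()
--     score = 0
--     for kw, points in MACRO_KEYWORDS_WEIGHTED: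
--         if kw in text:
--             score += points
--     for kw in EXCLUDE_KEYWORDS:
--         if kw in text:
--             score -= 3
--     return score
--
-- def _filter_news_macro_scored(news_items, max_items=12, min_score=0):
--     """Keep only macro-relevant news; sort by score descending; return top max_items."""
--     if not news_items:
--         return []
--     scored = []
--     for it in news_items:
--         s = _score_news_item(it.get("title") or "", it.get("description") or "")
--         if s >= min_score:
--             scored.append((s, it))
--     scored.sort(reverse=True, key=lambda x: x[0])
--     return [entry for _, entry in scored[:max_items]]
-- ===== SOURCE B (Python) =====
-- # Same scoring semantics as the original, but organised as weight groups
-- # (including the exclusion penalty as a weight of -3), so the score is a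
-- # single weighted-count sum; top-k selection is a counting/bucket pass over
-- # the bounded score range instead of a comparison sort.
-- KEYWORD_GROUPS = [
--     (5, ["fed", "federal reserve", "rate hike", "rate cut",
--          "monetary policy", "central bank"]),
--     (4, ["inflation", "cpi", "pce", "recession", "gdp", "unemployment"]),
--     (3, ["treasury", "bond yield", "10-year yield", "banking crisis",
--          "debt ceiling", "credit rating", "default"]),
--     (2, ["stock market", "s&p 500", "nasdaq", "dow"]),
--     (1, ["earnings", "profit warning", "oil price", "crude oil",
--          "geopolitical", "china economy", "trade war", "tariffs",
--          "housing market", "consumer spending"]),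
--     (-3, ["iphone", "tesla delivery", "product launch", "quarterly sales",
--           "stock split", "ceo interview", "merger talks"]),
-- ]
--
-- def _score_news_item(title, description=""):
--     text = ((title or "") + " " + (description or "")).lower()
--     return sum(w * sum(1 for kw in kws if kw in text) for w, kws in KEYWORD_GROUPS)
--
-- # Scores lie in [-21, 93] (93 = sum of positive weights, -21 = all penalties),
-- # so buckets per score level emitted from 93 down to -21 give exactly a stable
-- # descending sort by score; the final slice matches A's scored[:max_items].
-- def _filter_news_macro_scored(news_items, max_items=12, min_score=0):
--     buckets = {}
--     for it in news_items:
--         s = _score_news_item(it.get("title") or "", it.get("description") or "")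
--         if s >= min_score:
--             buckets.setdefault(s, []).append(it)
--     result = []
--     for s in range(93, -22, -1):
--         result += buckets.get(s, [])
--     return result[:max_items]
-- ===== Notes on version B (the rewrite author's own statement) =====
-- stated objective: alternative
-- what changed: Scoring becomes one weighted-count sum over weight groups (the exclusion penalty is just the weight -3 group) instead of two sequential keyword folds, and the full descending comparison sort plus slice is replaced by per-score buckets emitted from the highest possible score level (93) down to the lowest (-21) - a bucket/counting sort exploiting that scores are bounded sums of fixed weights.
import Mathlib
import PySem

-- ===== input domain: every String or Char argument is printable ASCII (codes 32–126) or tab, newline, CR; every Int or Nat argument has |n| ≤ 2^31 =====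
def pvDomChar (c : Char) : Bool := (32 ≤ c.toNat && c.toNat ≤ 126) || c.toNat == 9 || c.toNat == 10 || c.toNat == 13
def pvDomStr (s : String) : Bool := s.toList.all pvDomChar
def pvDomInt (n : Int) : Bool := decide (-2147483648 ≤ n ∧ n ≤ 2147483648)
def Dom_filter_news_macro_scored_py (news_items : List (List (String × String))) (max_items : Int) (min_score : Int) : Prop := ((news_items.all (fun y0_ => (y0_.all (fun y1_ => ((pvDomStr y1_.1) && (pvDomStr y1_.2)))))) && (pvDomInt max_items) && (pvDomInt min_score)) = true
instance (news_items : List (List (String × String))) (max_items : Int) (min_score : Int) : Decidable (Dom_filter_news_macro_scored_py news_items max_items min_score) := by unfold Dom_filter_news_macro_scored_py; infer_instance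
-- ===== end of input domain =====

-- B computes the score as one weighted-count sum over weight groups (the exclusion
-- penalty being the weight -3 group) and replaces the full descending sort + slice by
-- per-score buckets emitted from the highest score level down (objective: alternative).

-- ===== PORT A =====
-- module constants of A
def pvMacroKw : List (List Char × Int) := [
  ("fed".toList, 5), ("federal reserve".toList, 5), ("rate hike".toList, 5), ("rate cut".toList, 5),
  ("monetary policy".toList, 5), ("central bank".toList, 5),
  ("inflation".toList, 4), ("cpi".toList, 4), ("pce".toList, 4),
  ("recession".toList, 4), ("gdp".toList, 4), ("unemployment".toList, 4),
  ("treasury".toList, 3), ("bond yield".toList, 3), ("10-year yield".toList, 3),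
  ("banking crisis".toList, 3), ("debt ceiling".toList, 3), ("credit rating".toList, 3), ("default".toList, 3),
  ("stock market".toList, 2), ("s&p 500".toList, 2), ("nasdaq".toList, 2), ("dow".toList, 2),
  ("earnings".toList, 1), ("profit warning".toList, 1),
  ("oil price".toList, 1), ("crude oil".toList, 1), ("geopolitical".toList, 1), ("china economy".toList, 1),
  ("trade war".toList, 1), ("tariffs".toList, 1), ("housing market".toList, 1), ("consumer spending".toList, 1)]

def pvExclKw : List (List Char) := [
  "iphone".toList, "tesla delivery".toList, "product launch".toList, "quarterly sales".toList,
  "stock split".toList, "ceo interview".toList, "merger talks".toList]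

-- A's _score_news_item; on str arguments '(title or "")' is the identity
def pvScoreNewsItem (title description : String) : Int :=
  let text := PySem.Chars.lower (title.toList ++ [' '] ++ description.toList)
  let score := pvMacroKw.foldl (fun score kp => if PySem.Chars.isIn kp.1 text then score + kp.2 else score) 0
  pvExclKw.foldl (fun score kw => if PySem.Chars.isIn kw text then score - 3 else score) score

-- the inline expression `_score_news_item(it.get("title") or "", it.get("description") or "")`
-- in A; `d.get(k) or ""` = getD with default "" (None → "", "" → "")
def pvItemScore (it : List (String × String)) : Int :=
  pvScoreNewsItem ((PySem.Dict.mk it).getD "title" "") ((PySem.Dict.mk it).getD "description" "")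

def filter_news_macro_scored_py (news_items : List (List (String × String))) (max_items : Int) (min_score : Int) : List (List (String × String)) :=
  if news_items = [] then []
  else
    let scored := news_items.foldl (fun scored it =>
      let s := pvItemScore it
      if min_score ≤ s then scored ++ [(s, it)] else scored) ([] : List (Int × List (String × String)))
    let srt := PySem.List.sorted scored (fun x => x.1) true
    (PySem.List.slice srt none (some max_items)).map (fun e => e.2)

-- ===== PORT B =====
-- B's module constant KEYWORD_GROUPS: weight → keywords, penalty included as weight -3
def pvKwGroups : List (Int × List (List Char)) := [
  (5, ["fed".toList, "federal reserve".toList, "rate hike".toList, "rate cut".toList,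
       "monetary policy".toList, "central bank".toList]),
  (4, ["inflation".toList, "cpi".toList, "pce".toList, "recession".toList, "gdp".toList, "unemployment".toList]),
  (3, ["treasury".toList, "bond yield".toList, "10-year yield".toList, "banking crisis".toList,
       "debt ceiling".toList, "credit rating".toList, "default".toList]),
  (2, ["stock market".toList, "s&p 500".toList, "nasdaq".toList, "dow".toList]),
  (1, ["earnings".toList, "profit warning".toList, "oil price".toList, "crude oil".toList,
       "geopolitical".toList, "china economy".toList, "trade war".toList, "tariffs".toList,
       "housing market".toList, "consumer spending".toList]),
  (-3, ["iphone".toList, "tesla delivery".toList, "product launch".toList, "quarterly sales".toList,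
        "stock split".toList, "ceo interview".toList, "merger talks".toList])]

-- B's _score_news_item: sum(w * sum(1 for kw in kws if kw in text) for w, kws in KEYWORD_GROUPS)
def pvScoreB (title description : String) : Int :=
  let text := PySem.Chars.lower (title.toList ++ [' '] ++ description.toList)
  (pvKwGroups.map (fun g => g.1 * ((g.2.countP (fun kw => PySem.Chars.isIn kw text)) : Int))).sum

def pvItemScoreB (it : List (String × String)) : Int :=
  pvScoreB ((PySem.Dict.mk it).getD "title" "") ((PySem.Dict.mk it).getD "description" "")

def filter_news_macro_scored_py_alt (news_items : List (List (String × String))) (max_items : Int) (min_score : Int) : List (List (String × String)) :=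
  let buckets := news_items.foldl (fun buckets it =>
      let s := pvItemScoreB it
      if min_score ≤ s then buckets.modify s [] (fun b => b ++ [it]) else buckets)
    (PySem.Dict.empty : PySem.Dict Int (List (List (String × String))))
  let result := (PySem.List.pyRange 93 (-22) (-1)).foldl (fun result s => result ++ buckets.getD s []) []
  PySem.List.slice result none (some max_items)

-- ===== PRECONDITION & SPEC =====
def Spec_filter_news_macro_scored_py (news_items : List (List (String × String))) (max_items : Int) (min_score : Int) (out : List (List (String × String))) : Prop := out = filter_news_macro_scored_py_alt news_items max_items min_score
instance (news_items : List (List (String × String))) (max_items : Int) (min_score : Int) (out : List (List (String × String))) : Decidable (Spec_filter_news_macro_scored_py news_items max_items min_score out) := by unfold Spec_filter_news_macro_scored_py; infer_instance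

-- ===== CLAIM (what is proved, stated in full; the proofs are below) =====
def Claim_equal_filter_news_macro_scored_py : Prop := ∀ (news_items : List (List (String × String))) (max_items : Int) (min_score : Int), Dom_filter_news_macro_scored_py news_items max_items min_score → Spec_filter_news_macro_scored_py news_items max_items min_score (filter_news_macro_scored_py news_items max_items min_score)

-- ===== LEMMAS AND PROOFS =====

-- A's additive keyword fold is a sum over the matched keywords
theorem pv_foldl_add_eq_sum (t : List Char) (l : List (List Char × Int)) (s : Int) :
    l.foldl (fun score kp => if PySem.Chars.isIn kp.1 t then score + kp.2 else score) s
      = s + ((l.filter (fun kp => PySem.Chars.isIn kp.1 t)).map (·.2)).sum := by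
  induction l generalizing s with
  | nil => simp
  | cons p l ih =>
    simp only [List.foldl_cons, List.filter_cons]
    by_cases h : PySem.Chars.isIn p.1 t
    · simp [h, ih, add_assoc]
    · simp [h, ih]

-- A's exclusion fold subtracts 3 per matched exclusion keyword
theorem pv_foldl_sub_eq_count (t : List Char) (l : List (List Char)) (s : Int) :
    l.foldl (fun score kw => if PySem.Chars.isIn kw t then score - 3 else score) s
      = s - 3 * (l.countP (fun kw => PySem.Chars.isIn kw t) : Int) := by
  induction l generalizing s with
  | nil => simp
  | cons kw l ih =>
    simp only [List.foldl_cons, List.countP_cons]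
    by_cases h : PySem.Chars.isIn kw t
    · simp only [h, if_true, ih]; push_cast; ring
    · simp [h, ih]

-- flattening weight groups into (keyword, weight) pairs: matched-weight sum = weighted counts
theorem pv_groups_sum (t : List Char) (gs : List (Int × List (List Char))) :
    (((gs.flatMap (fun g => g.2.map (fun k => (k, g.1)))).filter
        (fun kp => PySem.Chars.isIn kp.1 t)).map (·.2)).sum
      = (gs.map (fun g => g.1 * ((g.2.countP (fun kw => PySem.Chars.isIn kw t)) : Int))).sum := by
  induction gs with
  | nil => rfl
  | cons g gs ih =>
    simp only [List.flatMap_cons, List.filter_append, List.map_append, List.sum_append, ih,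
      List.map_cons, List.sum_cons]
    congr 1
    induction g.2 with
    | nil => simp
    | cons k ks ihk =>
      simp only [List.map_cons, List.filter_cons, List.countP_cons]
      by_cases h : PySem.Chars.isIn k t
      · simp only [h, if_true, List.map_cons, List.sum_cons, ihk]; push_cast; ring
      · simpa [h] using ihk

-- A's flat weighted list is exactly the flattening of B's positive groups
theorem pv_flat_eq : pvMacroKw
    = (pvKwGroups.take 5).flatMap (fun g => g.2.map (fun k => (k, g.1))) := by decide

-- the two scoring functions agree
theorem pv_score_eq (title description : String) :
    pvScoreB title description = pvScoreNewsItem title description := by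
  simp only [pvScoreB, pvScoreNewsItem]
  rw [pv_foldl_add_eq_sum, pv_foldl_sub_eq_count, pv_flat_eq, pv_groups_sum]
  conv_lhs => rw [show pvKwGroups = pvKwGroups.take 5 ++ [((-3 : Int), pvExclKw)] from by decide]
  simp only [List.map_append, List.sum_append, List.map_cons, List.map_nil, List.sum_cons,
    List.sum_nil]
  omega

theorem pv_item_score_eq : pvItemScoreB = pvItemScore := by
  funext it
  simp [pvItemScoreB, pvItemScore, pv_score_eq]

-- the descending list of all possible score levels, [93, 92, …, -21]
theorem pv_range_eq : PySem.List.pyRange 93 (-22) (-1) = (List.range 115).map (fun k : Nat => (93 : Int) - (k : Int)) := by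
  decide

theorem pv_mem_range (n : Int) (h1 : -21 ≤ n) (h2 : n ≤ 93) :
    n ∈ PySem.List.pyRange 93 (-22) (-1) := by
  rw [pv_range_eq]
  have hk : (93 - n).toNat ∈ List.range 115 := List.mem_range.mpr (by omega)
  have he : (93 : Int) - ((93 - n).toNat : Nat) = n := by omega
  exact List.mem_map.mpr ⟨_, hk, he⟩

theorem pv_range_desc : (PySem.List.pyRange 93 (-22) (-1)).Pairwise (fun a b => b < a) := by
  decide

-- bounds for the scoring folds
theorem pv_foldl_add_bounds (t : List Char) (l : List (List Char × Int)) (hl : ∀ p ∈ l, 0 ≤ p.2) (s : Int) :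
    s ≤ l.foldl (fun score kp => if PySem.Chars.isIn kp.1 t then score + kp.2 else score) s ∧
    l.foldl (fun score kp => if PySem.Chars.isIn kp.1 t then score + kp.2 else score) s ≤ s + (l.map (·.2)).sum := by
  induction l generalizing s with
  | nil => simp
  | cons p l ih =>
    have hp : 0 ≤ p.2 := hl p (by simp)
    have hl' : ∀ q ∈ l, 0 ≤ q.2 := fun q hq => hl q (by simp [hq])
    simp only [List.foldl_cons, List.map_cons, List.sum_cons]
    split
    · have := ih hl' (s + p.2); omega
    · have := ih hl' s; omega

theorem pv_foldl_sub_bounds (t : List Char) (l : List (List Char)) (s : Int) :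
    s - 3 * l.length ≤ l.foldl (fun score kw => if PySem.Chars.isIn kw t then score - 3 else score) s ∧
    l.foldl (fun score kw => if PySem.Chars.isIn kw t then score - 3 else score) s ≤ s := by
  induction l generalizing s with
  | nil => simp
  | cons kw l ih =>
    simp only [List.foldl_cons, List.length_cons]
    split
    · have := ih (s - 3); constructor <;> [omega; omega]
    · have := ih s; constructor <;> [omega; omega]

theorem pv_score_bounds (title description : String) :
    -21 ≤ pvScoreNewsItem title description ∧ pvScoreNewsItem title description ≤ 93 := by
  simp only [pvScoreNewsItem]
  have hsum : (pvMacroKw.map (·.2)).sum = 93 := by decide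
  have hlen : pvExclKw.length = 7 := by decide
  have h1 := pv_foldl_add_bounds (PySem.Chars.lower (title.toList ++ [' '] ++ description.toList))
    pvMacroKw (by decide) 0
  have h2 := pv_foldl_sub_bounds (PySem.Chars.lower (title.toList ++ [' '] ++ description.toList))
    pvExclKw (pvMacroKw.foldl (fun score kp => if PySem.Chars.isIn kp.1 (PySem.Chars.lower (title.toList ++ [' '] ++ description.toList)) then score + kp.2 else score) 0)
  rw [hsum] at h1
  omega

-- insertBy helpers
theorem pv_insertBy_skip {α : Type} (before : α → α → Bool) (x : α) (as bs : List α)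
    (h : ∀ a ∈ as, before x a = false) :
    PySem.List.insertBy before x (as ++ bs) = as ++ PySem.List.insertBy before x bs := by
  induction as with
  | nil => simp
  | cons a as ih =>
    simp only [List.cons_append, PySem.List.insertBy, h a (by simp), Bool.false_eq_true, if_false]
    simpa using ih (fun a ha => h a (by simp [ha]))

theorem pv_insertBy_front {α : Type} (before : α → α → Bool) (x : α) (bs : List α)
    (h : ∀ a ∈ bs, before x a = true) :
    PySem.List.insertBy before x bs = x :: bs := by
  cases bs with
  | nil => rfl
  | cons b bs => simp [PySem.List.insertBy, h b (by simp)]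

-- groups: concatenation of the score buckets in the order of the level list
def pvGroups {α : Type} (ys : List (Int × α)) (L : List Int) : List (Int × α) :=
  L.flatMap (fun s => ys.filter (fun p => p.1 == s))

theorem pvGroups_cons {α : Type} (ys : List (Int × α)) (s : Int) (L : List Int) :
    pvGroups ys (s :: L) = ys.filter (fun p => p.1 == s) ++ pvGroups ys L := by
  simp [pvGroups]

theorem pv_groups_snoc_of_notmem {α : Type} (ys : List (Int × α)) (L : List Int) (x : Int × α)
    (h : ∀ t ∈ L, x.1 ≠ t) : pvGroups (ys ++ [x]) L = pvGroups ys L := by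
  induction L with
  | nil => rfl
  | cons t L ih =>
    rw [pvGroups_cons, pvGroups_cons, List.filter_append,
      ih (fun u hu => h u (by simp [hu]))]
    have hx : ((fun p => p.1 == t) x) = false := by simpa using h t (by simp)
    simp [hx]

theorem pv_insert_groups {α : Type} (x : Int × α) (L : List Int) (ys : List (Int × α)) :
    L.Pairwise (fun a b => b < a) → x.1 ∈ L →
    PySem.List.insertBy (fun a b => decide (b.1 < a.1)) x (pvGroups ys L)
      = pvGroups (ys ++ [x]) L := by
  induction L generalizing ys with
  | nil => intro _ hx; cases hx
  | cons s L' ih =>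
    intro hL hx
    have hlt : ∀ t ∈ L', t < s := (List.pairwise_cons.mp hL).1
    have hL' : L'.Pairwise (fun a b => b < a) := (List.pairwise_cons.mp hL).2
    have hg : ∀ a ∈ ys.filter (fun p => p.1 == s), a.1 = s := by
      intro a ha
      simpa using List.of_mem_filter ha
    have hrest : ∀ a ∈ pvGroups ys L', a.1 < s := by
      intro a ha
      rcases List.mem_flatMap.mp ha with ⟨t, ht, ha'⟩
      have h1 : a.1 = t := by simpa using List.of_mem_filter ha'
      rw [h1]; exact hlt t ht
    rw [pvGroups_cons, pvGroups_cons]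
    by_cases hxs : x.1 = s
    · rw [pv_insertBy_skip _ _ _ _ (by intro a ha; simp [hg a ha, hxs])]
      rw [pv_insertBy_front _ _ _
        (by intro a ha; simp only [decide_eq_true_eq]; rw [hxs]; exact hrest a ha)]
      rw [pv_groups_snoc_of_notmem ys L' x (by intro t ht; rw [hxs]; exact (hlt t ht).ne')]
      have h1 : (ys ++ [x]).filter (fun p => p.1 == s)
          = ys.filter (fun p => p.1 == s) ++ [x] := by
        simp [List.filter_append, hxs]
      rw [h1]
      simp
    · have hx' : x.1 ∈ L' := by
        rcases List.mem_cons.mp hx with h | h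
        · exact absurd h hxs
        · exact h
      have hxlt : x.1 < s := hlt _ hx'
      rw [pv_insertBy_skip _ _ _ _ (by intro a ha; simp [hg a ha]; omega)]
      rw [ih ys hL' hx']
      have h1 : (ys ++ [x]).filter (fun p => p.1 == s) = ys.filter (fun p => p.1 == s) := by
        have hx2 : ((fun p => p.1 == s) x) = false := by simpa using hxs
        simp [List.filter_append, hx2]
      rw [h1]

theorem pv_foldl_insert_groups {α : Type} (xs : List (Int × α)) (L : List Int)
    (hL : L.Pairwise (fun a b => b < a)) (hmem : ∀ p ∈ xs, p.1 ∈ L) :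
    ∀ ys, xs.foldl (fun acc x => PySem.List.insertBy (fun a b => decide (b.1 < a.1)) x acc) (pvGroups ys L)
      = pvGroups (ys ++ xs) L := by
  induction xs with
  | nil => intro ys; simp
  | cons x xs ih =>
    intro ys
    simp only [List.foldl_cons]
    rw [pv_insert_groups x L ys hL (hmem x (by simp))]
    rw [ih (fun p hp => hmem p (by simp [hp])) (ys ++ [x])]
    simp

theorem pv_sorted_eq_groups {α : Type} (xs : List (Int × α)) (L : List Int)
    (hL : L.Pairwise (fun a b => b < a)) (hmem : ∀ p ∈ xs, p.1 ∈ L) :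
    PySem.List.sorted xs (fun p => p.1) true = pvGroups xs L := by
  rw [PySem.List.sorted_rev_eq_foldl_insertBy]
  have h0 : ([] : List (Int × α)) = pvGroups [] L := by simp [pvGroups]
  rw [h0, pv_foldl_insert_groups xs L hL hmem []]
  simp

theorem pv_map_slice {α β : Type} (f : α → β) (xs : List α) (m : Int) :
    (PySem.List.slice xs none (some m)).map f = PySem.List.slice (xs.map f) none (some m) := by
  simp [PySem.List.slice, List.map_take]

theorem pv_item_mem_range (min_score : Int) (news : List (List (String × String))) (p : Int × List (String × String))
    (h : p ∈ (List.filter (fun it => decide (min_score ≤ pvItemScore it)) news).map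
      (fun it => (pvItemScore it, it))) :
    p.1 ∈ PySem.List.pyRange 93 (-22) (-1) := by
  rcases List.mem_map.mp h with ⟨it, _, rfl⟩
  exact pv_mem_range _ (pv_score_bounds _ _).1 (pv_score_bounds _ _).2

-- ===== VERDICT (by name: the statement is the Claim_ definition above) =====
theorem filter_news_macro_scored_py_spec : Claim_equal_filter_news_macro_scored_py := by
  intro news_items max_items min_score _hdom
  unfold Spec_filter_news_macro_scored_py
  unfold filter_news_macro_scored_py filter_news_macro_scored_py_alt
  simp only [pv_item_score_eq]
  -- the list of kept (score, item) pairs, common to both sides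
  set l := (news_items.filter (fun it => decide (min_score ≤ pvItemScore it))).map
    (fun it => (pvItemScore it, it)) with hl
  -- B side: buckets.getD s [] is the bucket of level s
  have hB1 : news_items.foldl
        (fun buckets it => if min_score ≤ pvItemScore it then buckets.modify (pvItemScore it) [] (fun b => b ++ [it]) else buckets)
        (PySem.Dict.empty : PySem.Dict Int (List (List (String × String))))
      = l.foldl (fun (d : PySem.Dict Int (List (List (String × String)))) p => d.modify p.1 [] (fun b => b ++ [p.2])) PySem.Dict.empty := by
    rw [hl, List.foldl_map]
    exact PySem.List.foldl_ite_eq_foldl_filter (fun it => min_score ≤ pvItemScore it)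
      (fun (d : PySem.Dict Int (List (List (String × String)))) it => d.modify (pvItemScore it) [] (fun b => b ++ [it])) news_items _
  rw [hB1]
  rw [PySem.List.foldl_append_eq_flatMap
    (fun s => (l.foldl (fun (d : PySem.Dict Int (List (List (String × String)))) p => d.modify p.1 [] (fun b => b ++ [p.2])) PySem.Dict.empty).getD s [])]
  simp only [PySem.Dict.getD_foldl_modify_append, List.nil_append]
  have hempty : ∀ s : Int,
      (PySem.Dict.empty : PySem.Dict Int (List (List (String × String)))).getD s [] = [] :=
    fun _ => rfl
  simp only [hempty, List.nil_append]
  -- A side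
  by_cases hnil : news_items = []
  · subst hnil
    simp [hl, PySem.List.slice]
  · rw [if_neg hnil]
    have hA1 : news_items.foldl
          (fun scored it => if min_score ≤ pvItemScore it then scored ++ [(pvItemScore it, it)] else scored)
          ([] : List (Int × List (String × String))) = l := by
      have := PySem.List.foldl_append_ite (fun it => min_score ≤ pvItemScore it)
        (fun it => (pvItemScore it, it)) news_items []
      rw [hl]
      simpa using this
    rw [hA1]
    rw [pv_sorted_eq_groups l (PySem.List.pyRange 93 (-22) (-1)) pv_range_desc
      (fun p hp => pv_item_mem_range min_score news_items p hp)]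
    rw [pv_map_slice]
    unfold pvGroups
    rw [List.map_flatMap]
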